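-- pv_equiv track=rewrite | github.com/mmerickel/advent-of-code-2019 | p3_1.py | render_path
-- ===== SOURCE A (Python) =====
-- MOVES = {
--     'R': lambda x, y: (x + 1, y),
--     'L': lambda x, y: (x - 1, y),
--     'U': lambda x, y: (x, y + 1),
--     'D': lambda x, y: (x, y - 1),
-- }
--
-- def render_path(path):
--     x = y = 0
--     points = []
--     for dir, m in path:
--         move = MOVES[dir]
--         for i in range(m):
--             x, y = move(x, y)
--             points.append((x, y))
--     return points
-- ===== SOURCE B (Python) =====
-- from itertools import accumulate
--
-- UNIT = {'R': (1, 0), 'L': (-1, 0), 'U': (0, 1), 'D': (0, -1)}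
--
-- def render_path(path):
--     deltas = []
--     for dir, m in path:
--         deltas.extend([UNIT[dir]] * m)
--     return list(accumulate(deltas, lambda p, d: (p[0] + d[0], p[1] + d[1])))
-- ===== Notes on version B (the rewrite author's own statement) =====
-- stated objective: alternative
-- what changed: Replaced the stateful per-step move-and-append loop with a flatten-then-scan: first build the flat list of unit deltas, then take its running sums with itertools.accumulate.
import Mathlib
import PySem

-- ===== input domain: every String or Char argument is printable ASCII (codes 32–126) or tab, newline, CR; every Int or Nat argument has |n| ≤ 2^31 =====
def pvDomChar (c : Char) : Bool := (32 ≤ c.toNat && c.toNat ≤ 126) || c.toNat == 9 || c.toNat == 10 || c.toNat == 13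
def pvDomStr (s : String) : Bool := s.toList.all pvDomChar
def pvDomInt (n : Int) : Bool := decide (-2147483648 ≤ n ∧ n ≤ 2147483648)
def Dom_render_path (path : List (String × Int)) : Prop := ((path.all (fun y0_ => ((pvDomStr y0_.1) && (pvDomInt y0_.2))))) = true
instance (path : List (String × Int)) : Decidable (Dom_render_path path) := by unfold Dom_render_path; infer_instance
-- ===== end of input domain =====

-- B builds the flat list of unit deltas, then returns its running sums (one scan),
-- instead of A's stateful per-step move-and-append nested loop.

-- ===== PORT A =====
-- MOVES[dir] applied to (x, y); the "D" arm is also the fallthrough, but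
-- Pre_render_path restricts dir to the four keys where MOVES[dir] exists.
def pvMoveA (dir : String) (x y : Int) : Int × Int :=
  if dir = "R" then (x + 1, y)
  else if dir = "L" then (x - 1, y)
  else if dir = "U" then (x, y + 1)
  else (x, y - 1)

-- one iteration of A's inner loop body: x, y = move(x, y); points.append((x, y))
def pvStepA (dir : String) (st : Int × Int × List (Int × Int)) : Int × Int × List (Int × Int) :=
  let p := pvMoveA dir st.1 st.2.1
  (p.1, p.2, st.2.2 ++ [p])

def render_path (path : List (String × Int)) : List (Int × Int) :=
  let st : Int × Int × List (Int × Int) :=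
    path.foldl (fun st seg =>
      (PySem.List.pyRange 0 seg.2 1).foldl (fun st _ => pvStepA seg.1 st) st) (0, 0, [])
  st.2.2

-- ===== PORT B =====
-- UNIT[dir]; the "D" arm is the fallthrough, unreachable under Pre_render_path.
def pvUnit (dir : String) : Int × Int :=
  if dir = "R" then (1, 0)
  else if dir = "L" then (-1, 0)
  else if dir = "U" then (0, 1)
  else (0, -1)

-- itertools.accumulate with no initial value: running sums, origin excluded.
def pvAccum (p : Int × Int) : List (Int × Int) → List (Int × Int)
  | [] => []
  | d :: ds => let q := (p.1 + d.1, p.2 + d.2); q :: pvAccum q ds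

def render_path_alt (path : List (String × Int)) : List (Int × Int) :=
  pvAccum (0, 0) (path.flatMap (fun seg => List.replicate seg.2.toNat (pvUnit seg.1)))

-- ===== PRECONDITION & SPEC =====
-- Pre_ excludes path entries whose direction is not a key of MOVES ('R','L','U','D'):
-- on those the Python A (and B alike) raises KeyError.
def Pre_render_path (path : List (String × Int)) : Prop :=
  ∀ seg ∈ path, seg.1 = "R" ∨ seg.1 = "L" ∨ seg.1 = "U" ∨ seg.1 = "D"
instance (path : List (String × Int)) : Decidable (Pre_render_path path) := by
  unfold Pre_render_path; infer_instance

def pvWitness_render_path : (List (String × Int)) := [("R", 2), ("U", 1), ("L", 3)]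

def Spec_render_path (path : List (String × Int)) (out : List (Int × Int)) : Prop := out = render_path_alt path
instance (path : List (String × Int)) (out : List (Int × Int)) : Decidable (Spec_render_path path out) := by unfold Spec_render_path; infer_instance

-- ===== CLAIM (what is proved, stated in full; the proofs are below) =====
def Claim_equal_render_path : Prop := ∀ (path : List (String × Int)), Dom_render_path path → Pre_render_path path → Spec_render_path path (render_path path)

-- ===== LEMMAS AND PROOFS =====

-- one A-step moves by the unit delta (true for every string: both chains share the fallthrough)
lemma pvMoveA_eq_unit (dir : String) (x y : Int) :
    pvMoveA dir x y = (x + (pvUnit dir).1, y + (pvUnit dir).2) := by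
  unfold pvMoveA pvUnit
  split_ifs <;> simp <;> ring

lemma pvAccum_append (p : Int × Int) (l1 l2 : List (Int × Int)) :
    pvAccum p (l1 ++ l2) =
      pvAccum p l1 ++ pvAccum (l1.foldl (fun q d => (q.1 + d.1, q.2 + d.2)) p) l2 := by
  induction l1 generalizing p with
  | nil => simp [pvAccum]
  | cons d ds ih => simp [pvAccum, ih]

-- A's inner loop over a list of length n, starting from (x, y, pts)
lemma pvStepA_eq (dir : String) (x y : Int) (pts : List (Int × Int)) :
    pvStepA dir (x, y, pts) =
      (x + (pvUnit dir).1, y + (pvUnit dir).2,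
        pts ++ [(x + (pvUnit dir).1, y + (pvUnit dir).2)]) := by
  simp [pvStepA, pvMoveA_eq_unit]

lemma inner_loop (dir : String) (l : List Int) (x y : Int) (pts : List (Int × Int)) :
    l.foldl (fun st _ => pvStepA dir st) (x, y, pts) =
      (let ds := List.replicate l.length (pvUnit dir)
       let fin := ds.foldl (fun q d => (q.1 + d.1, q.2 + d.2)) (x, y)
       (fin.1, fin.2, pts ++ pvAccum (x, y) ds)) := by
  induction l generalizing x y pts with
  | nil => simp [pvAccum]
  | cons a l ih =>
    simp only [List.foldl_cons, pvStepA_eq]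
    rw [ih]
    simp [List.replicate_succ, pvAccum]

lemma outer_loop (path : List (String × Int)) (x y : Int) (pts : List (Int × Int)) :
    (path.foldl (fun st seg =>
        (PySem.List.pyRange 0 seg.2 1).foldl (fun st _ => pvStepA seg.1 st) st) (x, y, pts)).2.2 =
      pts ++ pvAccum (x, y)
        (path.flatMap (fun seg => List.replicate seg.2.toNat (pvUnit seg.1))) := by
  induction path generalizing x y pts with
  | nil => simp [pvAccum]
  | cons seg rest ih =>
    simp only [List.foldl_cons, List.flatMap_cons]
    rw [inner_loop, pvAccum_append]
    simp only [PySem.List.length_pyRange_one]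
    rw [ih]
    simp

-- ===== VERDICT (by name: the statement is the Claim_ definition above) =====
theorem render_path_spec : Claim_equal_render_path := by
  intro path _ _
  unfold Spec_render_path render_path render_path_alt
  simpa using outer_loop path 0 0 []
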